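-- pv_equiv track=rewrite | github.com/abedjar/HYDROSAFE | UK-dale/house1/read.py | trim_list_under
-- ===== SOURCE A (Python) =====
-- def trim_list_under(lst, upper):
--     first = 0
--     last = len(lst)-1
--     for i in range(0, len(lst)):
--         if lst[i] > upper:
--             first = i
--             break
--     for i in range(len(lst)-1, -1, -1):
--         if lst[i] > upper:
--             last = i
--             break
--
--     return lst[first:last+1]
-- ===== SOURCE B (Python) =====
-- def trim_list_under(lst, upper):
--     idx = [i for i, x in enumerate(lst) if x > upper]
--     if idx:
--         return lst[idx[0]:idx[-1] + 1]
--     return lst[0:len(lst)]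
-- ===== Notes on version B (the rewrite author's own statement) =====
-- stated objective: simpler
-- what changed: Replaces A's two directional early-exit scans (forward for the first index, backward for the last) by a single forward pass collecting all matching indices, then one slice from the first to the last collected index.
import Mathlib
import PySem

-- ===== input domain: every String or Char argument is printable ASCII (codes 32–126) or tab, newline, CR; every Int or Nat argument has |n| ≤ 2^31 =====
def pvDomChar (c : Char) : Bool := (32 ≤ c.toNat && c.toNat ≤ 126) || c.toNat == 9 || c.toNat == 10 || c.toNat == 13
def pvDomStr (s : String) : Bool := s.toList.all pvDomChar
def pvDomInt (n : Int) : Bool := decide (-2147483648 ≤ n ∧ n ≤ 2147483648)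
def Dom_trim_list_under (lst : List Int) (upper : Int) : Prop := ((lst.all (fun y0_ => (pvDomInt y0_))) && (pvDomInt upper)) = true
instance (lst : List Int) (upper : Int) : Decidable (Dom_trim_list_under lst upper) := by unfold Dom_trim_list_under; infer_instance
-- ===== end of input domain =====

-- B replaces A's two directional early-exit scans by one forward pass collecting all matching
-- indices plus a single slice (objective: simpler).

-- ===== PORT A =====
-- 'for i in range(…): if lst[i] > upper: <record i>; break', returning dflt if no break fires;
-- every scanned i is in range, so pyGetD is exact for lst[i] here.
def trimScanA (lst : List Int) (upper : Int) (dflt : Int) : List Int → Int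
  | [] => dflt
  | i :: rest => if PySem.List.pyGetD lst i 0 > upper then i else trimScanA lst upper dflt rest

def trim_list_under (lst : List Int) (upper : Int) : List Int :=
  let first := trimScanA lst upper 0 (PySem.List.pyRange 0 (lst.length : Int) 1)
  let last := trimScanA lst upper ((lst.length : Int) - 1)
      (PySem.List.pyRange ((lst.length : Int) - 1) (-1) (-1))
  PySem.List.slice lst (some first) (some (last + 1))

-- ===== PORT B =====
def trim_list_under_alt (lst : List Int) (upper : Int) : List Int :=
  let idx := ((PySem.List.enumerate lst 0).filter (fun p => p.2 > upper)).map Prod.fst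
  if idx ≠ [] then   -- Python truthiness of the list idx
    PySem.List.slice lst (some (PySem.List.pyGetD idx 0 0))
      (some (PySem.List.pyGetD idx (-1) 0 + 1))
  else
    PySem.List.slice lst (some 0) (some (lst.length : Int))

-- ===== PRECONDITION & SPEC =====
def Spec_trim_list_under (lst : List Int) (upper : Int) (out : List Int) : Prop := out = trim_list_under_alt lst upper
instance (lst : List Int) (upper : Int) (out : List Int) : Decidable (Spec_trim_list_under lst upper out) := by unfold Spec_trim_list_under; infer_instance

-- ===== CLAIM (what is proved, stated in full; the proofs are below) =====
def Claim_equal_trim_list_under : Prop := ∀ (lst : List Int) (upper : Int), Dom_trim_list_under lst upper → Spec_trim_list_under lst upper (trim_list_under lst upper)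

-- ===== LEMMAS AND PROOFS =====

-- A's early-exit scan returns the first scanned index that matches, else the default.
theorem trimScanA_eq_head (lst : List Int) (upper dflt : Int) (ks : List Int) :
    trimScanA lst upper dflt ks =
      ((ks.filter (fun i => PySem.List.pyGetD lst i 0 > upper)).head?).getD dflt := by
  induction ks with
  | nil => simp [trimScanA]
  | cons i rest ih =>
      by_cases h : PySem.List.pyGetD lst i 0 > upper
      · simp [trimScanA, h]
      · simp [trimScanA, h, ih]

-- A's forward range, filtered, as a filtered Nat range.
theorem pyfilter_eq_range (lst : List Int) (upper : Int) :
    (PySem.List.pyRange 0 (lst.length : Int) 1).filter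
        (fun i => PySem.List.pyGetD lst i 0 > upper) =
      ((List.range lst.length).filter (fun k => lst.getD k 0 > upper)).map
        (fun (k : Nat) => (k : Int)) := by
  rw [PySem.List.pyRange_one, List.filter_map]
  simp [Function.comp_def, List.getD_eq_getElem?_getD]

-- B's enumerate-filter-map of the fst components, as the same filtered Nat range (shifted by start).
theorem enum_idx_eq_range (upper : Int) : ∀ (xs : List Int) (s : Int),
    ((PySem.List.enumerate xs s).filter (fun p => p.2 > upper)).map Prod.fst =
      ((List.range xs.length).filter (fun k => xs.getD k 0 > upper)).map
        (fun (k : Nat) => s + (k : Int)) := by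
  intro xs
  induction xs with
  | nil => intro s; simp [PySem.List.enumerate_nil]
  | cons x tl ih =>
      intro s
      simp only [PySem.List.enumerate_cons, List.length_cons, List.range_succ_eq_map,
        List.filter_cons, List.filter_map, List.getD_cons_zero, List.getD_cons_succ,
        Function.comp_def]
      by_cases h : x > upper
      · simp [h, ih (s + 1)]
        intro a _ _; ring
      · simp [h, ih (s + 1)]
        intro a _ _; ring

-- hence B's collected index list equals A's filtered forward range
theorem idx_eq_filter_range (lst : List Int) (upper : Int) :
    ((PySem.List.enumerate lst 0).filter (fun p => p.2 > upper)).map Prod.fst =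
      (PySem.List.pyRange 0 (lst.length : Int) 1).filter
        (fun i => PySem.List.pyGetD lst i 0 > upper) := by
  rw [enum_idx_eq_range upper lst 0, pyfilter_eq_range]
  simp

-- the backward countdown range is the reverse of the forward range
theorem countdown_eq_reverse (n : Int) :
    PySem.List.pyRange (n - 1) (-1) (-1) = (PySem.List.pyRange 0 n 1).reverse := by
  rw [PySem.List.pyRange_neg_one_eq_reverse]
  norm_num

-- ===== VERDICT (by name: the statement is the Claim_ definition above) =====
theorem trim_list_under_spec : Claim_equal_trim_list_under := by
  intro lst upper _
  unfold Spec_trim_list_under trim_list_under trim_list_under_alt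
  rw [trimScanA_eq_head, trimScanA_eq_head, countdown_eq_reverse, List.filter_reverse,
    List.head?_reverse]
  simp only [idx_eq_filter_range]
  cases hF : (PySem.List.pyRange 0 (lst.length : Int) 1).filter
      (fun i => PySem.List.pyGetD lst i 0 > upper) with
  | nil =>
      simp only [List.head?_nil, List.getLast?_nil, Option.getD_none, ne_eq,
        not_true_eq_false, if_false]
      norm_num
  | cons i rest =>
      have hne : i :: rest ≠ [] := by simp
      simp only [List.head?_cons, Option.getD_some, ne_eq, hne, not_false_eq_true, if_true,
        PySem.List.pyGetD_zero_cons, List.getLast?_eq_some_getLast hne]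
      rw [PySem.List.pyGetD_neg_one (i :: rest) 0 hne]
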